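-- pv_equiv track=rewrite | github.com/xxxxxthhh/voicetyper | src/pause_segmenter.py | _snap_pos_to_token
-- ===== SOURCE A (Python) =====
-- def _snap_pos_to_token(
--     src_content: list[tuple[int, str]],
--     token: str,
--     center: int,
--     min_pos: int,
--     max_pos: int,
-- ) -> int | None:
--     if min_pos > max_pos:
--         return None
--     center = max(min_pos, min(center, max_pos))
--     left = max(min_pos, center - 20)
--     right = min(max_pos, center + 20)
--
--     best_pos = None
--     best_dist = None
--     for pos in range(left, right + 1):
--         if src_content[pos][1] != token:
--             continue
--         dist = abs(pos - center)
--         if best_dist is None or dist < best_dist: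
--             best_dist = dist
--             best_pos = pos
--     return best_pos
-- ===== SOURCE B (Python) =====
-- def _snap_pos_to_token(
--     src_content,
--     token,
--     center,
--     min_pos,
--     max_pos,
-- ):
--     if min_pos > max_pos:
--         return None
--     center = max(min_pos, min(center, max_pos))
--     left = max(min_pos, center - 20)
--     right = min(max_pos, center + 20)
--
--     # outward from the center: distance 0, then 1, ..., 20; left side first
--     candidates = [center]
--     for d in range(1, 21):
--         candidates.append(center - d)
--         candidates.append(center + d)
--     for pos in candidates:
--         if left <= pos <= right and src_content[pos][1] == token:
--             return pos
--     return None
-- ===== Notes on version B (the rewrite author's own statement) =====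
-- stated objective: alternative
-- what changed: Replaces the left-to-right best_pos/best_dist scan of the window with an outward-from-center search (distance 0,1,...,20, left candidate before right) returning the first in-window match, which preserves the smaller-index tie-break.
import Mathlib
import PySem

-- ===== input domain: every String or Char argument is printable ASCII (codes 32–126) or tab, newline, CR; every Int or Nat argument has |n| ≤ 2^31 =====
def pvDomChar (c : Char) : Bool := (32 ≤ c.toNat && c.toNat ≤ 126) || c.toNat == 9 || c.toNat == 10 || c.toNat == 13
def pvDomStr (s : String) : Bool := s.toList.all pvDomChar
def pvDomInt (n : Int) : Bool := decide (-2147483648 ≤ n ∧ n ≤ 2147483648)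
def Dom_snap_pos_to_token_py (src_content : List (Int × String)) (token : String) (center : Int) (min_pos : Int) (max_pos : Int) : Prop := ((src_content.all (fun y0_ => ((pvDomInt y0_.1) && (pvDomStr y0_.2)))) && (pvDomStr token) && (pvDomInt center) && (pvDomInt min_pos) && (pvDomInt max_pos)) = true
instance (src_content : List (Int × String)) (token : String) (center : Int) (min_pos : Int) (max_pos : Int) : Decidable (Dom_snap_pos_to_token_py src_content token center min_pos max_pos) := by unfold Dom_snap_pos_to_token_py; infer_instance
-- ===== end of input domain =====

-- B replaces A's left-to-right best_pos/best_dist scan by an outward-from-center search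
-- (distance 0, 1, …, 20; left candidate before right) returning the first in-window match;
-- objective: alternative decomposition, same cost.

-- ===== PORT A =====
def snap_pos_to_token_py (src_content : List (Int × String)) (token : String) (center : Int) (min_pos : Int) (max_pos : Int) : Option Int :=
  if min_pos > max_pos then none
  else
    let center := max min_pos (min center max_pos)
    let left := max min_pos (center - 20)
    let right := min max_pos (center + 20)
    let st := (PySem.List.pyRange left (right + 1) 1).foldl
      (fun (st : Option Int × Option Int) pos =>
        match PySem.List.pyGet? src_content pos with
        | none => st  -- IndexError in Python; excluded by Pre_
        | some e =>
          if e.2 ≠ token then st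
          else
            let dist := |pos - center|
            match st.2 with
            | none => (some pos, some dist)
            | some bd => if dist < bd then (some pos, some dist) else st)
      ((none, none) : Option Int × Option Int)
    st.1

-- ===== PORT B =====
def snap_pos_to_token_py_alt (src_content : List (Int × String)) (token : String) (center : Int) (min_pos : Int) (max_pos : Int) : Option Int :=
  if min_pos > max_pos then none
  else
    let center := max min_pos (min center max_pos)
    let left := max min_pos (center - 20)
    let right := min max_pos (center + 20)
    let candidates := (PySem.List.pyRange 1 21 1).foldl
      (fun acc d => acc ++ [center - d, center + d]) [center]
    candidates.find? (fun pos =>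
      decide (left ≤ pos) && decide (pos ≤ right) &&
        (match PySem.List.pyGet? src_content pos with
         | some e => e.2 == token
         | none => false))

-- ===== PRECONDITION & SPEC =====
-- Pre_ excludes exactly the inputs where Python A raises IndexError: some scanned window
-- position is outside [-len, len) of src_content (when min_pos ≤ max_pos).
def Pre_snap_pos_to_token_py (src_content : List (Int × String)) (token : String) (center : Int) (min_pos : Int) (max_pos : Int) : Prop :=
  min_pos > max_pos ∨
    (-(src_content.length : Int) ≤ max min_pos (max min_pos (min center max_pos) - 20) ∧
      min max_pos (max min_pos (min center max_pos) + 20) < (src_content.length : Int))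
instance (src_content : List (Int × String)) (token : String) (center : Int) (min_pos : Int) (max_pos : Int) : Decidable (Pre_snap_pos_to_token_py src_content token center min_pos max_pos) := by unfold Pre_snap_pos_to_token_py; infer_instance

def pvWitness_snap_pos_to_token_py : (List (Int × String)) × String × Int × Int × Int :=
  ([(0, "a"), (1, "b"), (2, "a")], "a", 2, 0, 2)

def Spec_snap_pos_to_token_py (src_content : List (Int × String)) (token : String) (center : Int) (min_pos : Int) (max_pos : Int) (out : Option Int) : Prop := out = snap_pos_to_token_py_alt src_content token center min_pos max_pos
instance (src_content : List (Int × String)) (token : String) (center : Int) (min_pos : Int) (max_pos : Int) (out : Option Int) : Decidable (Spec_snap_pos_to_token_py src_content token center min_pos max_pos out) := by unfold Spec_snap_pos_to_token_py; infer_instance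

-- ===== CLAIM (what is proved, stated in full; the proofs are below) =====
def Claim_equal_snap_pos_to_token_py : Prop := ∀ (src_content : List (Int × String)) (token : String) (center : Int) (min_pos : Int) (max_pos : Int), Dom_snap_pos_to_token_py src_content token center min_pos max_pos → Pre_snap_pos_to_token_py src_content token center min_pos max_pos → Spec_snap_pos_to_token_py src_content token center min_pos max_pos (snap_pos_to_token_py src_content token center min_pos max_pos)

-- ===== LEMMAS AND PROOFS =====

-- the match predicate both ports consult
def pvPred (src : List (Int × String)) (token : String) (pos : Int) : Bool :=
  match PySem.List.pyGet? src pos with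
  | some e => e.2 == token
  | none => false

-- A's loop body, abstracted over the predicate
def pvStep (p : Int → Bool) (c : Int) (st : Option Int × Option Int) (pos : Int) : Option Int × Option Int :=
  if p pos then
    match st.2 with
    | none => (some pos, some |pos - c|)
    | some bd => if |pos - c| < bd then (some pos, some |pos - c|) else st
  else st

def pvFoldA (p : Int → Bool) (c : Int) (l : List Int) (st : Option Int × Option Int) : Option Int × Option Int :=
  l.foldl (pvStep p c) st

-- B's candidate order, by radius
def pvCand (c : Int) : Nat → List Int
  | 0 => [c]
  | n + 1 => pvCand c n ++ [c - ((n : Int) + 1), c + ((n : Int) + 1)]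

def pvCheck (p : Int → Bool) (L R : Int) (x : Int) : Bool :=
  decide (L ≤ x) && decide (x ≤ R) && p x

lemma pvCand_mem {c : Int} : ∀ (n : Nat) (x : Int), x ∈ pvCand c n → c - n ≤ x ∧ x ≤ c + n := by
  intro n
  induction n with
  | zero => intro x hx; simp [pvCand] at hx; omega
  | succ n ih =>
    intro x hx
    simp [pvCand] at hx
    rcases hx with h | h | h
    · have := ih x h; push_cast; omega
    · push_cast; omega
    · push_cast; omega

lemma pvFind_congr {p q : Int → Bool} : ∀ (l : List Int), (∀ x ∈ l, p x = q x) → l.find? p = l.find? q := by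
  intro l
  induction l with
  | nil => intro _; rfl
  | cons x l ih =>
    intro h
    simp only [List.find?]
    rw [h x (by simp)]
    cases q x
    · exact ih (fun y hy => h y (by simp [hy]))
    · rfl

-- once best_pos is set it never becomes none again
lemma pvFoldA_some {p : Int → Bool} {c : Int} : ∀ (l : List Int) (a d : Int),
    ∃ a' d', pvFoldA p c l (some a, some d) = (some a', some d') := by
  intro l
  induction l with
  | nil => intro a d; exact ⟨a, d, rfl⟩
  | cons x l ih =>
    intro a d
    simp only [pvFoldA, List.foldl_cons]
    by_cases hp : p x
    · simp only [pvStep, hp, if_true]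
      by_cases hlt : |x - c| < d
      · simpa [hlt] using ih x |x - c|
      · simpa [hlt] using ih a d
    · simpa [pvStep, hp] using ih a d

-- an initial best whose distance dominates every element of l
lemma pvFoldA_dominated {p : Int → Bool} {c : Int} : ∀ (l : List Int) (p0 d0 : Int),
    (∀ x ∈ l, |x - c| < d0) →
    pvFoldA p c l (some p0, some d0) =
      if (pvFoldA p c l (none, none)).1 = none then (some p0, some d0)
      else pvFoldA p c l (none, none) := by
  intro l
  induction l with
  | nil => intro p0 d0 _; simp [pvFoldA]
  | cons x l ih =>
    intro p0 d0 h
    have hx : |x - c| < d0 := h x (by simp)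
    simp only [pvFoldA, List.foldl_cons]
    by_cases hp : p x
    · simp only [pvStep, hp, if_true, hx, if_true]
      obtain ⟨a', d', h'⟩ := pvFoldA_some (p := p) (c := c) l x |x - c|
      simp only [pvFoldA] at h' ⊢
      rw [h']; simp
    · simp only [pvStep, hp]
      exact ih p0 d0 (fun y hy => h y (by simp [hy]))

-- states reachable with every seen distance ≤ D
def pvGood (D : Int) (st : Option Int × Option Int) : Prop :=
  st = (none, none) ∨ ∃ a d, st = (some a, some d) ∧ d ≤ D

lemma pvFoldA_good {p : Int → Bool} {c D : Int} : ∀ (l : List Int) (st : Option Int × Option Int),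
    pvGood D st → (∀ x ∈ l, |x - c| ≤ D) → pvGood D (pvFoldA p c l st) := by
  intro l
  induction l with
  | nil => intro st h _; exact h
  | cons x l ih =>
    intro st hst h
    have hx : |x - c| ≤ D := h x (by simp)
    simp only [pvFoldA, List.foldl_cons]
    refine ih _ ?_ (fun y hy => h y (by simp [hy]))
    rcases hst with h0 | ⟨a, d, h1, h2⟩
    · subst h0
      by_cases hp : p x
      · exact Or.inr ⟨x, |x - c|, by simp [pvStep, hp], hx⟩
      · exact Or.inl (by simp [pvStep, hp])
    · subst h1
      by_cases hp : p x
      · by_cases hlt : |x - c| < d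
        · exact Or.inr ⟨x, |x - c|, by simp [pvStep, hp, hlt], hx⟩
        · exact Or.inr ⟨a, d, by simp [pvStep, hp, hlt], h2⟩
      · exact Or.inr ⟨a, d, by simp [pvStep, hp], h2⟩

lemma pvGoodI {D : Int} {s : Option Int × Option Int}
    (h : pvGood D s) (h1 : s.1 = none) : s = (none, none) := by
  rcases h with h | ⟨a, d, h, _⟩
  · exact h
  · rw [h] at h1; simp at h1

-- one step at distance n+1 from a state whose best distance is ≤ n+1
lemma pvStepR {p : Int → Bool} {c : Int} {n : Nat} {S : Option Int × Option Int} {R : Int}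
    (hS : pvGood ((n : Int) + 1) S) (habs : |R - c| = (n : Int) + 1) :
    (pvStep p c S R).1 = S.1.or (if p R then some R else none) := by
  rcases hS with h0 | ⟨a, d, ha, hd⟩
  · subst h0
    cases hp : p R <;> simp [pvStep, hp]
  · subst ha
    cases hp : p R
    · simp [pvStep, hp]
    · have hnl : ¬ (|R - c| < d) := by rw [habs]; omega
      simp [pvStep, hp, hnl]

-- the core equivalence on a window [L, R] around c of radius ≤ n
lemma pvMain {p : Int → Bool} : ∀ (n : Nat) (c L R : Int),
    c - n ≤ L → L ≤ c → c ≤ R → R ≤ c + n →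
    (pvFoldA p c (PySem.List.pyRange L (R + 1) 1) (none, none)).1 =
      (pvCand c n).find? (pvCheck p L R) := by
  intro n
  induction n with
  | zero =>
    intro c L R h1 h2 h3 h4
    have hL : L = c := by omega
    have hR : R = c := by omega
    rw [hL, hR, PySem.List.pyRange_one_singleton]
    cases hp : p c <;>
      simp [pvCand, pvFoldA, List.find?, pvStep, pvCheck, hp]
  | succ n ih =>
    intro c L R h1 h2 h3 h4
    push_cast at h1 h4
    set L' : Int := max L (c - n) with hL'def
    set R' : Int := min R (c + n) with hR'def
    have hb1 : c - n ≤ L' := by omega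
    have hb2 : L' ≤ c := by omega
    have hb3 : c ≤ R' := by omega
    have hb4 : R' ≤ c + n := by omega
    have hIH := ih c L' R' hb1 hb2 hb3 hb4
    have hsp : PySem.List.pyRange L (R + 1) 1
        = PySem.List.pyRange L L' 1 ++ (PySem.List.pyRange L' (R' + 1) 1 ++ PySem.List.pyRange (R' + 1) (R + 1) 1) := by
      rw [← PySem.List.pyRange_one_append L' (R' + 1) (R + 1) (by omega) (by omega),
          ← PySem.List.pyRange_one_append L L' (R + 1) (by omega) (by omega)]
    have hcand : pvCand c (n + 1) = pvCand c n ++ [c - ((n : Int) + 1), c + ((n : Int) + 1)] := by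
      simp [pvCand]
    have hinner_mem : ∀ x ∈ PySem.List.pyRange L' (R' + 1) 1, |x - c| ≤ (n : Int) := by
      intro x hx
      rw [PySem.List.mem_pyRange_one] at hx
      exact abs_le.mpr (by omega)
    have hIgood : pvGood ((n : Int) + 1) ((PySem.List.pyRange L' (R' + 1) 1).foldl (pvStep p c) (none, none)) := by
      have := pvFoldA_good (p := p) (c := c) (D := (n : Int) + 1) (PySem.List.pyRange L' (R' + 1) 1)
        (none, none) (Or.inl rfl) (fun x hx => le_trans (hinner_mem x hx) (by omega))
      simpa [pvFoldA] using this
    have hBfix : (pvCand c n).find? (pvCheck p L R) = (pvCand c n).find? (pvCheck p L' R') := by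
      apply pvFind_congr
      intro x hx
      obtain ⟨hx1, hx2⟩ := pvCand_mem n x hx
      unfold pvCheck
      have e1 : decide (L ≤ x) = decide (L' ≤ x) := by
        simp only [decide_eq_decide]; omega
      have e2 : decide (x ≤ R) = decide (x ≤ R') := by
        simp only [decide_eq_decide]; omega
      rw [e1, e2]
    rw [hsp, hcand, List.find?_append, hBfix, ← hIH]
    simp only [pvFoldA, List.foldl_append]
    have habsL : L = c - ((n : Int) + 1) → |L - c| = (n : Int) + 1 := by
      intro h; have h' : L - c = -((n : Int) + 1) := by omega
      rw [h', abs_neg]; exact abs_of_nonneg (by omega)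
    have habsR : R = c + ((n : Int) + 1) → |R - c| = (n : Int) + 1 := by
      intro h; have h' : R - c = (n : Int) + 1 := by omega
      rw [h']; exact abs_of_nonneg (by omega)
    -- the tail list, resolved once
    have hpostE : R ≤ c + (n : Int) → PySem.List.pyRange (R' + 1) (R + 1) 1 = [] := by
      intro h; exact PySem.List.pyRange_one_eq_nil (by omega)
    have hpostS : ¬ R ≤ c + (n : Int) → PySem.List.pyRange (R' + 1) (R + 1) 1 = [R] := by
      intro h
      have h5 : R' = R - 1 := by omega
      rw [h5]
      have h6 : R - 1 + 1 = R := by omega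
      rw [h6, ← PySem.List.pyRange_one_singleton]
    by_cases hpreL : c - (n : Int) ≤ L
    case pos =>
      -- the prefix is empty (the far-left cell is not in the window)
      have hpre : PySem.List.pyRange L L' 1 = [] := PySem.List.pyRange_one_eq_nil (by omega)
      rw [hpre]
      simp only [List.foldl_nil]
      have c1 : pvCheck p L R (c - ((n : Int) + 1)) = false := by
        unfold pvCheck
        have h5 : decide (L ≤ c - ((n : Int) + 1)) = false := by simp; omega
        simp [h5]
      generalize hI : (PySem.List.pyRange L' (R' + 1) 1).foldl (pvStep p c) (none, none) = I
      rw [hI] at hIgood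
      by_cases hpostR : R ≤ c + (n : Int)
      case pos =>
        rw [hpostE hpostR]
        simp only [List.foldl_nil]
        have c2 : pvCheck p L R (c + ((n : Int) + 1)) = false := by
          unfold pvCheck
          have h5 : decide (c + ((n : Int) + 1) ≤ R) = false := by simp; omega
          simp [h5]
        rw [List.find?, c1, List.find?, c2, List.find?]
        cases I.1 <;> simp
      case neg =>
        have hRR : R = c + ((n : Int) + 1) := by omega
        rw [hpostS hpostR]
        simp only [List.foldl_cons, List.foldl_nil]
        have c2 : pvCheck p L R (c + ((n : Int) + 1)) = p R := by
          unfold pvCheck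
          rw [← hRR]
          have e1 : decide (L ≤ R) = true := by simp; omega
          simp [e1]
        rw [List.find?, c1, List.find?, c2, List.find?,
          pvStepR hIgood (habsR hRR)]
        cases p R <;> cases I.1 <;> simp [hRR]
    case neg =>
      -- the prefix is [L] with L = c - (n+1)
      have hLL : L = c - ((n : Int) + 1) := by omega
      have hL'L : L' = L + 1 := by omega
      have hpre : PySem.List.pyRange L L' 1 = [L] := by
        rw [hL'L, ← PySem.List.pyRange_one_singleton]
      rw [hpre]
      simp only [List.foldl_cons, List.foldl_nil]
      have c1 : pvCheck p L R (c - ((n : Int) + 1)) = p L := by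
        unfold pvCheck
        rw [← hLL]
        have e2 : decide (L ≤ R) = true := by simp; omega
        simp [e2]
      cases hpL : p L
      case false =>
        have hstep : pvStep p c (none, none) L = (none, none) := by simp [pvStep, hpL]
        rw [hstep]
        generalize hI : (PySem.List.pyRange L' (R' + 1) 1).foldl (pvStep p c) (none, none) = I
        rw [hI] at hIgood
        by_cases hpostR : R ≤ c + (n : Int)
        case pos =>
          rw [hpostE hpostR]
          simp only [List.foldl_nil]
          have c2 : pvCheck p L R (c + ((n : Int) + 1)) = false := by
            unfold pvCheck
            have h5 : decide (c + ((n : Int) + 1) ≤ R) = false := by simp; omega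
            simp [h5]
          rw [List.find?, c1, hpL, List.find?, c2, List.find?]
          cases I.1 <;> simp
        case neg =>
          have hRR : R = c + ((n : Int) + 1) := by omega
          rw [hpostS hpostR]
          simp only [List.foldl_cons, List.foldl_nil]
          have c2 : pvCheck p L R (c + ((n : Int) + 1)) = p R := by
            unfold pvCheck
            rw [← hRR]
            have e1 : decide (L ≤ R) = true := by simp; omega
            simp [e1]
          rw [List.find?, c1, hpL, List.find?, c2, List.find?,
            pvStepR hIgood (habsR hRR)]
          cases p R <;> cases I.1 <;> simp [hRR]
      case true =>
        have hstep : pvStep p c (none, none) L = (some L, some ((n : Int) + 1)) := by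
          simp [pvStep, hpL, habsL hLL]
        rw [hstep]
        have hdom : (PySem.List.pyRange L' (R' + 1) 1).foldl (pvStep p c) (some L, some ((n : Int) + 1))
            = if ((PySem.List.pyRange L' (R' + 1) 1).foldl (pvStep p c) (none, none)).1 = none
              then (some L, some ((n : Int) + 1))
              else (PySem.List.pyRange L' (R' + 1) 1).foldl (pvStep p c) (none, none) := by
          have := pvFoldA_dominated (p := p) (c := c) (PySem.List.pyRange L' (R' + 1) 1) L ((n : Int) + 1)
            (fun x hx => lt_of_le_of_lt (hinner_mem x hx) (by omega))
          simpa [pvFoldA] using this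
        rw [hdom]
        generalize hI : (PySem.List.pyRange L' (R' + 1) 1).foldl (pvStep p c) (none, none) = I
        rw [hI] at hIgood
        rcases hI1 : I.1 with _ | a
        case none =>
          have hI0 : I = (none, none) := pvGoodI hIgood hI1
          rw [if_pos rfl]
          have hSg : pvGood ((n : Int) + 1) ((some L, some ((n : Int) + 1)) : Option Int × Option Int) :=
            Or.inr ⟨L, (n : Int) + 1, rfl, le_refl _⟩
          by_cases hpostR : R ≤ c + (n : Int)
          case pos =>
            rw [hpostE hpostR]
            simp only [List.foldl_nil]
            rw [List.find?, c1, hpL]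
            simp [hLL]
          case neg =>
            have hRR : R = c + ((n : Int) + 1) := by omega
            rw [hpostS hpostR]
            simp only [List.foldl_cons, List.foldl_nil]
            rw [pvStepR hSg (habsR hRR), List.find?, c1, hpL]
            simp [hLL]
        case some =>
          rw [if_neg (by simp)]
          by_cases hpostR : R ≤ c + (n : Int)
          case pos =>
            rw [hpostE hpostR]
            simp only [List.foldl_nil]
            rw [hI1]
            simp
          case neg =>
            have hRR : R = c + ((n : Int) + 1) := by omega
            rw [hpostS hpostR]
            simp only [List.foldl_cons, List.foldl_nil]
            rw [pvStepR hIgood (habsR hRR), hI1]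
            simp

lemma pvCandFold (c : Int) : ∀ (n : Nat),
    (PySem.List.pyRange 1 ((n : Int) + 1) 1).foldl (fun acc d => acc ++ [c - d, c + d]) [c] = pvCand c n := by
  intro n
  induction n with
  | zero =>
    rw [show ((0 : Nat) : Int) + 1 = 1 by norm_num, PySem.List.pyRange_one_eq_nil (by omega)]
    rfl
  | succ n ih =>
    rw [show (((n + 1 : Nat)) : Int) + 1 = ((n : Int) + 1) + 1 by push_cast; ring,
      PySem.List.pyRange_one_succ_right (by omega), List.foldl_append, ih]
    rfl

-- ===== VERDICT (by name: the statement is the Claim_ definition above) =====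
theorem snap_pos_to_token_py_spec : Claim_equal_snap_pos_to_token_py := by
  intro src token center min_pos max_pos _ _
  unfold Spec_snap_pos_to_token_py snap_pos_to_token_py snap_pos_to_token_py_alt
  by_cases h : min_pos > max_pos
  · rw [if_pos h, if_pos h]
  · rw [if_neg h, if_neg h]
    dsimp only
    set c : Int := max min_pos (min center max_pos) with hc
    set L : Int := max min_pos (c - 20) with hL
    set R : Int := min max_pos (c + 20) with hR
    have hA : (fun (st : Option Int × Option Int) pos =>
        match PySem.List.pyGet? src pos with
        | none => st
        | some e =>
          if e.2 ≠ token then st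
          else
            let dist := |pos - c|
            match st.2 with
            | none => (some pos, some dist)
            | some bd => if dist < bd then (some pos, some dist) else st)
        = pvStep (pvPred src token) c := by
      funext st pos
      unfold pvStep pvPred
      cases hg : PySem.List.pyGet? src pos with
      | none => simp
      | some e =>
        by_cases ht : e.2 = token
        · simp [ht]
        · simp [ht]
    have hB : (fun pos =>
        decide (L ≤ pos) && decide (pos ≤ R) &&
          (match PySem.List.pyGet? src pos with
           | some e => e.2 == token
           | none => false))
        = pvCheck (pvPred src token) L R := by
      funext pos
      unfold pvCheck pvPred
      rfl
    rw [hA, hB, show (21 : Int) = ((20 : Nat) : Int) + 1 by norm_num, pvCandFold]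
    have hmain := pvMain (p := pvPred src token) 20 c L R (by omega) (by omega) (by omega) (by omega)
    norm_num [pvFoldA] at hmain
    exact hmain
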